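-- pv_equiv track=rewrite | github.com/MrBrantCode/unitest_baseline | mut_generate/mist_train_taco/taco_624/solution.py | calculate_zero_coverage
-- ===== SOURCE A (Python) =====
-- def calculate_zero_coverage(matrix):
--     coverage_total = 0
--     n = len(matrix)
--     m = len(matrix[0])
--
--     for i in range(n):
--         for j in range(m):
--             if matrix[i][j] == 0:
--                 if j - 1 >= 0 and matrix[i][j - 1] == 1:
--                     coverage_total += 1
--                 if j + 1 < m and matrix[i][j + 1] == 1:
--                     coverage_total += 1
--                 if i - 1 >= 0 and matrix[i - 1][j] == 1:
--                     coverage_total += 1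
--                 if i + 1 < n and matrix[i + 1][j] == 1:
--                     coverage_total += 1
--
--     return coverage_total
-- ===== SOURCE B (Python) =====
-- def calculate_zero_coverage(matrix):
--     n = len(matrix)
--     m = len(matrix[0])
--     total = 0
--     # horizontal edges: each 0-1 adjacency in a row, counted once
--     for i in range(n):
--         row = matrix[i]
--         for j in range(m - 1):
--             a, b = row[j], row[j + 1]
--             if (a == 0 and b == 1) or (a == 1 and b == 0):
--                 total += 1
--     # vertical edges: each 0-1 adjacency in a column, counted once
--     for i in range(n - 1):
--         r1 = matrix[i]
--         r2 = matrix[i + 1]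
--         for j in range(m):
--             a, b = r1[j], r2[j]
--             if (a == 0 and b == 1) or (a == 1 and b == 0):
--                 total += 1
--     return total
-- ===== Notes on version B (the rewrite author's own statement) =====
-- stated objective: alternative
-- what changed: B iterates over grid edges (each right/down neighbour pair exactly once, counting unordered {0,1} pairs) instead of A's per-zero-cell scan of all four neighbours.
import Mathlib
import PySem

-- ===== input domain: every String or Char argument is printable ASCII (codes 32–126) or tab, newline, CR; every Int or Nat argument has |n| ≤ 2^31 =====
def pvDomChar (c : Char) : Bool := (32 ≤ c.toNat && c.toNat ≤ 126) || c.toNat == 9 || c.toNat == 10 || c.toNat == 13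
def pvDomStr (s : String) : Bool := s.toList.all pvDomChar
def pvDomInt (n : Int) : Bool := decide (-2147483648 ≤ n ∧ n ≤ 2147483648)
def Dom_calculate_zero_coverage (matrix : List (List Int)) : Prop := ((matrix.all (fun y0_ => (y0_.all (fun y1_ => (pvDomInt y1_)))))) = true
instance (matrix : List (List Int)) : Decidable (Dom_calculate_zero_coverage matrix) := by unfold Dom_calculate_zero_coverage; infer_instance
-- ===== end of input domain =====

-- B counts each 0–1 grid edge once (right and down neighbour of every cell) instead of
-- A's per-zero-cell inspection of all four neighbours: a different decomposition, same cost class.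

-- ===== PORT A =====
def calculate_zero_coverage (matrix : List (List Int)) : Int :=
  let n : Int := matrix.length
  let m : Int := (PySem.List.pyGetD matrix 0 []).length
  (PySem.List.pyRange 0 n 1).foldl (fun acc i =>
    (PySem.List.pyRange 0 m 1).foldl (fun acc j =>
      if PySem.List.pyGetD (PySem.List.pyGetD matrix i []) j 0 = 0 then
        let acc := if 0 ≤ j - 1 ∧ PySem.List.pyGetD (PySem.List.pyGetD matrix i []) (j - 1) 0 = 1 then acc + 1 else acc
        let acc := if j + 1 < m ∧ PySem.List.pyGetD (PySem.List.pyGetD matrix i []) (j + 1) 0 = 1 then acc + 1 else acc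
        let acc := if 0 ≤ i - 1 ∧ PySem.List.pyGetD (PySem.List.pyGetD matrix (i - 1) []) j 0 = 1 then acc + 1 else acc
        let acc := if i + 1 < n ∧ PySem.List.pyGetD (PySem.List.pyGetD matrix (i + 1) []) j 0 = 1 then acc + 1 else acc
        acc
      else acc) acc) 0

-- ===== PORT B =====
def calculate_zero_coverage_alt (matrix : List (List Int)) : Int :=
  let n : Int := matrix.length
  let m : Int := (PySem.List.pyGetD matrix 0 []).length
  let horiz : Int := (PySem.List.pyRange 0 n 1).foldl (fun acc i =>
    let row := PySem.List.pyGetD matrix i []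
    (PySem.List.pyRange 0 (m - 1) 1).foldl (fun acc j =>
      let a := PySem.List.pyGetD row j 0
      let b := PySem.List.pyGetD row (j + 1) 0
      if (a = 0 ∧ b = 1) ∨ (a = 1 ∧ b = 0) then acc + 1 else acc) acc) 0
  let vert : Int := (PySem.List.pyRange 0 (n - 1) 1).foldl (fun acc i =>
    let r1 := PySem.List.pyGetD matrix i []
    let r2 := PySem.List.pyGetD matrix (i + 1) []
    (PySem.List.pyRange 0 m 1).foldl (fun acc j =>
      let a := PySem.List.pyGetD r1 j 0
      let b := PySem.List.pyGetD r2 j 0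
      if (a = 0 ∧ b = 1) ∨ (a = 1 ∧ b = 0) then acc + 1 else acc) acc) 0
  horiz + vert

-- ===== PRECONDITION & SPEC =====
-- Pre_ excludes exactly the inputs where the Python A raises IndexError:
-- the empty matrix (matrix[0]) and ragged matrices with a row shorter than the first row.
def Pre_calculate_zero_coverage (matrix : List (List Int)) : Prop :=
  matrix ≠ [] ∧ ∀ row ∈ matrix, (matrix.headD []).length ≤ row.length
instance (matrix : List (List Int)) : Decidable (Pre_calculate_zero_coverage matrix) := by
  unfold Pre_calculate_zero_coverage; infer_instance
def pvWitness_calculate_zero_coverage : List (List Int) := [[0, 1, 0], [1, 2, 0]]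

def Spec_calculate_zero_coverage (matrix : List (List Int)) (out : Int) : Prop := out = calculate_zero_coverage_alt matrix
instance (matrix : List (List Int)) (out : Int) : Decidable (Spec_calculate_zero_coverage matrix out) := by unfold Spec_calculate_zero_coverage; infer_instance

-- ===== CLAIM (what is proved, stated in full; the proofs are below) =====
def Claim_equal_calculate_zero_coverage : Prop := ∀ (matrix : List (List Int)), Dom_calculate_zero_coverage matrix → Pre_calculate_zero_coverage matrix → Spec_calculate_zero_coverage matrix (calculate_zero_coverage matrix)

-- ===== LEMMAS AND PROOFS =====

def pvE (a b : Int) : Int := if (a = 0 ∧ b = 1) ∨ (a = 1 ∧ b = 0) then 1 else 0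

lemma pv_sum_pyRange (b : Int) (f : Int → Int) :
    ((PySem.List.pyRange 0 b 1).map f).sum = ∑ k ∈ Finset.range b.toNat, f (k : Int) := by
  rw [PySem.List.pyRange_one]
  simp [List.map_map, Function.comp_def]
  rfl

lemma pv_oneD (u : Int → Int) (M : Nat) :
    (∑ j ∈ Finset.range M, ((if u j = 0 ∧ 1 ≤ (j : Int) ∧ u ((j : Int) - 1) = 1 then (1:Int) else 0)
      + (if u j = 0 ∧ (j : Int) + 1 < (M : Int) ∧ u ((j : Int) + 1) = 1 then 1 else 0)))
    = ∑ j ∈ Finset.range (M - 1), pvE (u j) (u ((j : Int) + 1)) := by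
  cases M with
  | zero => simp
  | succ t =>
    rw [Finset.sum_add_distrib, Finset.sum_range_succ' (fun j => (if u j = 0 ∧ 1 ≤ (j : Int) ∧ u ((j : Int) - 1) = 1 then (1:Int) else 0)),
        Finset.sum_range_succ]
    have h0 : (if u (0:Nat) = 0 ∧ 1 ≤ ((0:Nat) : Int) ∧ u (((0:Nat) : Int) - 1) = 1 then (1:Int) else 0) = 0 := by
      norm_num
    have ht : (if u t = 0 ∧ (t : Int) + 1 < ((t+1 : Nat) : Int) ∧ u ((t : Int) + 1) = 1 then (1:Int) else 0) = 0 := by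
      push_cast; norm_num
    rw [h0, ht, add_zero, add_zero, Nat.add_sub_cancel, ← Finset.sum_add_distrib]
    apply Finset.sum_congr rfl
    intro j hj
    have hjt : j < t := Finset.mem_range.mp hj
    have e1 : ((j + 1 : Nat) : Int) = (j : Int) + 1 := by push_cast; ring
    have e2 : (((j + 1 : Nat) : Int) - 1) = (j : Int) := by push_cast; ring
    rw [e2, e1]
    simp only [pvE]
    split_ifs <;> omega

def pvFA (g : Int → Int → Int) (n m i j : Int) : Int :=
  if g i j = 0 then
    (if 0 ≤ j - 1 ∧ g i (j - 1) = 1 then 1 else 0)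
    + (if j + 1 < m ∧ g i (j + 1) = 1 then 1 else 0)
    + (if 0 ≤ i - 1 ∧ g (i - 1) j = 1 then 1 else 0)
    + (if i + 1 < n ∧ g (i + 1) j = 1 then 1 else 0)
  else 0

lemma pv_FA_split (g : Int → Int → Int) (n m i j : Int) :
    pvFA g n m i j =
      ((if g i j = 0 ∧ 1 ≤ j ∧ g i (j - 1) = 1 then 1 else 0)
        + (if g i j = 0 ∧ j + 1 < m ∧ g i (j + 1) = 1 then 1 else 0))
      + ((if g i j = 0 ∧ 1 ≤ i ∧ g (i - 1) j = 1 then 1 else 0)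
        + (if g i j = 0 ∧ i + 1 < n ∧ g (i + 1) j = 1 then 1 else 0)) := by
  simp only [pvFA]
  split_ifs <;> omega

lemma pv_core (g : Int → Int → Int) (n m : Nat) :
    (∑ i ∈ Finset.range n, ∑ j ∈ Finset.range m, pvFA g (n : Int) (m : Int) (i : Int) (j : Int))
    = (∑ i ∈ Finset.range n, ∑ j ∈ Finset.range (m - 1), pvE (g i j) (g i ((j : Int) + 1)))
      + (∑ i ∈ Finset.range (n - 1), ∑ j ∈ Finset.range m, pvE (g i j) (g ((i : Int) + 1) j)) := by
  have hsplit : ∀ i ∈ Finset.range n, (∑ j ∈ Finset.range m, pvFA g (n : Int) (m : Int) (i : Int) (j : Int))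
      = (∑ j ∈ Finset.range m,
          ((if g i j = 0 ∧ 1 ≤ (j : Int) ∧ g i ((j : Int) - 1) = 1 then (1:Int) else 0)
            + (if g i j = 0 ∧ (j : Int) + 1 < (m : Int) ∧ g i ((j : Int) + 1) = 1 then 1 else 0)))
        + (∑ j ∈ Finset.range m,
          ((if g i j = 0 ∧ 1 ≤ (i : Int) ∧ g ((i : Int) - 1) j = 1 then (1:Int) else 0)
            + (if g i j = 0 ∧ (i : Int) + 1 < (n : Int) ∧ g ((i : Int) + 1) j = 1 then 1 else 0))) := by
    intro i _
    rw [← Finset.sum_add_distrib]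
    exact Finset.sum_congr rfl (fun j _ => pv_FA_split g n m i j)
  rw [Finset.sum_congr rfl hsplit, Finset.sum_add_distrib]
  congr 1
  · exact Finset.sum_congr rfl (fun i _ => pv_oneD (g i) m)
  · rw [Finset.sum_comm]
    have h2 : ∀ y ∈ Finset.range m,
        (∑ x ∈ Finset.range n, ((if g x y = 0 ∧ 1 ≤ (x : Int) ∧ g ((x : Int) - 1) y = 1 then (1:Int) else 0)
          + (if g x y = 0 ∧ (x : Int) + 1 < (n : Int) ∧ g ((x : Int) + 1) y = 1 then 1 else 0)))
        = ∑ i ∈ Finset.range (n - 1), pvE (g i y) (g ((i : Int) + 1) y) :=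
      fun y _ => pv_oneD (fun x => g x (y : Int)) n
    rw [Finset.sum_congr rfl h2]
    exact Finset.sum_comm

def pvCell (matrix : List (List Int)) (i j : Int) : Int :=
  PySem.List.pyGetD (PySem.List.pyGetD matrix i []) j 0

lemma pv_foldA2 (g : Int → Int → Int) (n m : Int) :
    (PySem.List.pyRange 0 n 1).foldl (fun acc i =>
      (PySem.List.pyRange 0 m 1).foldl (fun acc j =>
        if g i j = 0 then
          let acc := if 0 ≤ j - 1 ∧ g i (j - 1) = 1 then acc + 1 else acc
          let acc := if j + 1 < m ∧ g i (j + 1) = 1 then acc + 1 else acc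
          let acc := if 0 ≤ i - 1 ∧ g (i - 1) j = 1 then acc + 1 else acc
          let acc := if i + 1 < n ∧ g (i + 1) j = 1 then acc + 1 else acc
          acc
        else acc) acc) 0
    = ∑ i ∈ Finset.range n.toNat, ∑ j ∈ Finset.range m.toNat, pvFA g n m (i : Int) (j : Int) := by
  have hin : (fun (acc i : Int) =>
      (PySem.List.pyRange 0 m 1).foldl (fun acc j =>
        if g i j = 0 then
          let acc := if 0 ≤ j - 1 ∧ g i (j - 1) = 1 then acc + 1 else acc
          let acc := if j + 1 < m ∧ g i (j + 1) = 1 then acc + 1 else acc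
          let acc := if 0 ≤ i - 1 ∧ g (i - 1) j = 1 then acc + 1 else acc
          let acc := if i + 1 < n ∧ g (i + 1) j = 1 then acc + 1 else acc
          acc
        else acc) acc)
      = fun acc i => acc + ((PySem.List.pyRange 0 m 1).map (pvFA g n m i)).sum := by
    funext acc i
    have hb : (fun (acc j : Int) =>
        if g i j = 0 then
          let acc := if 0 ≤ j - 1 ∧ g i (j - 1) = 1 then acc + 1 else acc
          let acc := if j + 1 < m ∧ g i (j + 1) = 1 then acc + 1 else acc
          let acc := if 0 ≤ i - 1 ∧ g (i - 1) j = 1 then acc + 1 else acc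
          let acc := if i + 1 < n ∧ g (i + 1) j = 1 then acc + 1 else acc
          acc
        else acc) = fun acc j => acc + pvFA g n m i j := by
      funext acc j
      simp only [pvFA]
      split_ifs <;> omega
    rw [hb, PySem.List.foldl_add]
  rw [hin, PySem.List.foldl_add, zero_add, pv_sum_pyRange]
  exact Finset.sum_congr rfl (fun i _ => pv_sum_pyRange m (pvFA g n m i))

lemma pv_foldB2 (a b : Int → Int → Int) (N K : Int) :
    (PySem.List.pyRange 0 N 1).foldl (fun acc i =>
      (PySem.List.pyRange 0 K 1).foldl (fun acc j =>
        if (a i j = 0 ∧ b i j = 1) ∨ (a i j = 1 ∧ b i j = 0) then acc + 1 else acc) acc) 0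
    = ∑ i ∈ Finset.range N.toNat, ∑ j ∈ Finset.range K.toNat, pvE (a i j) (b i j) := by
  have hin : (fun (acc i : Int) =>
      (PySem.List.pyRange 0 K 1).foldl (fun acc j =>
        if (a i j = 0 ∧ b i j = 1) ∨ (a i j = 1 ∧ b i j = 0) then acc + 1 else acc) acc)
      = fun acc i => acc + ((PySem.List.pyRange 0 K 1).map (fun j => pvE (a i j) (b i j))).sum := by
    funext acc i
    have hb : (fun (acc j : Int) =>
        if (a i j = 0 ∧ b i j = 1) ∨ (a i j = 1 ∧ b i j = 0) then acc + 1 else acc)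
        = fun acc j => acc + pvE (a i j) (b i j) := by
      funext acc j
      simp only [pvE]
      split_ifs <;> omega
    rw [hb, PySem.List.foldl_add]
  rw [hin, PySem.List.foldl_add, zero_add, pv_sum_pyRange]
  exact Finset.sum_congr rfl (fun i _ => pv_sum_pyRange K _)
lemma pv_final (M : List (List Int)) : calculate_zero_coverage M = calculate_zero_coverage_alt M := by
  have hA : calculate_zero_coverage M
      = ∑ i ∈ Finset.range ((M.length : Int)).toNat,
          ∑ j ∈ Finset.range (((PySem.List.pyGetD M 0 []).length : Int)).toNat,
            pvFA (pvCell M) (M.length : Int) ((PySem.List.pyGetD M 0 []).length : Int) (i : Int) (j : Int) :=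
    pv_foldA2 (pvCell M) _ _
  have hB : calculate_zero_coverage_alt M
      = (∑ i ∈ Finset.range ((M.length : Int)).toNat,
          ∑ j ∈ Finset.range (((PySem.List.pyGetD M 0 []).length : Int) - 1).toNat,
            pvE (pvCell M i j) (pvCell M i ((j : Int) + 1)))
        + (∑ i ∈ Finset.range (((M.length : Int)) - 1).toNat,
            ∑ j ∈ Finset.range (((PySem.List.pyGetD M 0 []).length : Int)).toNat,
              pvE (pvCell M i j) (pvCell M ((i : Int) + 1) j)) :=
    congrArg₂ HAdd.hAdd
      (pv_foldB2 (fun i j => pvCell M i j) (fun i j => pvCell M i (j + 1)) _ _)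
      (pv_foldB2 (fun i j => pvCell M i j) (fun i j => pvCell M (i + 1) j) _ _)
  rw [hA, hB]
  have e1 : ((M.length : Int)).toNat = M.length := by omega
  have e2 : (((PySem.List.pyGetD M 0 []).length : Int)).toNat = (PySem.List.pyGetD M 0 []).length := by omega
  have e3 : (((PySem.List.pyGetD M 0 []).length : Int) - 1).toNat = (PySem.List.pyGetD M 0 []).length - 1 := by omega
  have e4 : (((M.length : Int)) - 1).toNat = M.length - 1 := by omega
  rw [e1, e2, e3, e4]
  exact pv_core (pvCell M) M.length (PySem.List.pyGetD M 0 []).length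

-- ===== VERDICT (by name: the statement is the Claim_ definition above) =====
theorem calculate_zero_coverage_spec : Claim_equal_calculate_zero_coverage :=
  fun matrix _ _ => pv_final matrix
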